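-- pv_equiv track=rewrite | github.com/theroggy/pysnippets | pysnippets/stackoverflow_questions/2025/2025-07-26_shp_longer_cols.py | suffix_duplicates
-- ===== SOURCE A (Python) =====
-- def suffix_duplicates(strings: list[str]) -> list[str]:
--     """Append a suffix to duplicate strings.
--
--     Parameters:
--     -----------
--     strings: a list of strings
--         A list of strings with potential duplicates.
--
--     Returns:
--     --------
--     list[str]
--         The list of strings with unique names by adding a suffix
--         for duplicates.
--     """
--     unique_strings = []
--     string_indexes = {}
--     for string in strings:
--         if string not in string_indexes:
--             string_indexes[string] = 0
--         else:
--             string_indexes[string] += 1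
--         if string_indexes[string] > 0:
--             unique_strings.append(f"{string}_{string_indexes[string]}")
--         else:
--             unique_strings.append(string)
--
--     return unique_strings
-- ===== SOURCE B (Python) =====
-- def suffix_duplicates(strings: list[str]) -> list[str]:
--     """Append a suffix to duplicate strings.
--
--     Two passes: first total up occurrences, then walk the list backwards,
--     counting down so each element's remaining count is its prefix rank;
--     the output is built back-to-front and reversed at the end.
--     """
--     counts = {}
--     for s in strings:
--         counts[s] = counts.get(s, 0) + 1
--     out = []
--     for s in reversed(strings):
--         counts[s] = counts[s] - 1
--         c = counts[s]
--         out.append(s if c == 0 else f"{s}_{c}")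
--     out.reverse()
--     return out
-- ===== Notes on version B (the rewrite author's own statement) =====
-- stated objective: alternative
-- what changed: Instead of emitting suffixes during one forward scan with a running counter dict, B first totals all occurrences, then traverses the list backwards decrementing the totals so the remaining count is each element's prefix rank, building the result back-to-front and reversing it once.
import Mathlib
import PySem

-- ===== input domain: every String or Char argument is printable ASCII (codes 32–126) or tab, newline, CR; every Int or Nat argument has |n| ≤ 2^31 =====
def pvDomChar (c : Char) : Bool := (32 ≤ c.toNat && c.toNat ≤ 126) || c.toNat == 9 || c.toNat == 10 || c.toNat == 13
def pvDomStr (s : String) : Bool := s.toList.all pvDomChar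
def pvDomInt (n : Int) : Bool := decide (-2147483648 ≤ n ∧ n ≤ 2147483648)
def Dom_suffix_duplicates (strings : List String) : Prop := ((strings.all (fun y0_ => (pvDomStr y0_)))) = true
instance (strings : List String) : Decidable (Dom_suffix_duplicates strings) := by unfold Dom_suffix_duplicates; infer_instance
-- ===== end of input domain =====

-- B totals all occurrences first, then walks the list backwards counting down, so the
-- remaining count is each element's prefix rank; the output is built back-to-front.

-- ===== PORT A =====
def suffix_duplicates (strings : List String) : List String :=
  (strings.foldl
    (fun (st : List String × PySem.Dict String Int) s =>
      let d :=
        if st.2.contains s then st.2.modify s 0 (· + 1)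
        else st.2.insert s 0
      if d.getD s 0 > 0 then
        (st.1 ++ [s ++ "_" ++ PySem.Int.toStr (d.getD s 0)], d)
      else
        (st.1 ++ [s], d))
    ([], PySem.Dict.empty)).1

-- ===== PORT B =====
def suffix_duplicates_alt (strings : List String) : List String :=
  let counts := strings.foldl
    (fun (d : PySem.Dict String Int) s => d.insert s (d.getD s 0 + 1)) PySem.Dict.empty
  let out := strings.reverse.foldl
    (fun (st : List String × PySem.Dict String Int) s =>
      -- counts[s] = counts[s] - 1: s is always a key (first pass), so modify's default is never used
      let d := st.2.modify s 0 (· - 1)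
      let c := d.getD s 0
      (st.1 ++ [if c == 0 then s else s ++ "_" ++ PySem.Int.toStr c], d))
    ([], counts)
  out.1.reverse

-- ===== PRECONDITION & SPEC =====
def Spec_suffix_duplicates (strings : List String) (out : List String) : Prop := out = suffix_duplicates_alt strings
instance (strings : List String) (out : List String) : Decidable (Spec_suffix_duplicates strings out) := by unfold Spec_suffix_duplicates; infer_instance

-- ===== CLAIM (what is proved, stated in full; the proofs are below) =====
def Claim_equal_suffix_duplicates : Prop := ∀ (strings : List String), Dom_suffix_duplicates strings → Spec_suffix_duplicates strings (suffix_duplicates strings)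

-- ===== LEMMAS AND PROOFS =====

-- the value emitted for element s when the preceding elements are `pre`
def sfx (pre : List String) (s : String) : String :=
  if (pre.count s : Int) == 0 then s else s ++ "_" ++ PySem.Int.toStr (pre.count s : Int)

-- reference computation: emit sfx for each element against its prefix
def bLoop (seen : List String) : List String → List String
  | [] => []
  | s :: t => sfx seen s :: bLoop (seen ++ [s]) t

lemma bLoop_append (pre xs : List String) (s : String) :
    bLoop pre (xs ++ [s]) = bLoop pre xs ++ [sfx (pre ++ xs) s] := by
  induction xs generalizing pre with
  | nil => simp [bLoop]
  | cons x t ih => simp [bLoop, ih (pre ++ [x])]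

lemma loopB_eq_bLoop (rev : List String) (pre : List String) :
    ∀ (acc : List String) (d : PySem.Dict String Int),
    (∀ t, d.getD t 0 = (pre.count t : Int) + (rev.count t : Int)) →
    (rev.foldl
      (fun (st : List String × PySem.Dict String Int) s =>
        let d := st.2.modify s 0 (· - 1)
        let c := d.getD s 0
        (st.1 ++ [if c == 0 then s else s ++ "_" ++ PySem.Int.toStr c], d))
      (acc, d)).1 = acc ++ (bLoop pre rev.reverse).reverse := by
  induction rev with
  | nil => intro acc d _; simp [bLoop]
  | cons s rest ih =>
    intro acc d hv
    rw [List.foldl_cons]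
    have hcs : (d.modify s 0 (· - 1)).getD s 0
        = (pre.count s : Int) + (rest.count s : Int) := by
      rw [PySem.Dict.getD_modify_self, hv s]
      simp only [List.count_cons, beq_self_eq_true, if_true]
      push_cast; ring
    have hemit :
        (if (d.modify s 0 (· - 1)).getD s 0 == 0 then s
          else s ++ "_" ++ PySem.Int.toStr ((d.modify s 0 (· - 1)).getD s 0))
        = sfx (pre ++ rest.reverse) s := by
      unfold sfx
      rw [hcs]
      simp [List.count_append]
    have hstep := ih (acc ++ [if (d.modify s 0 (· - 1)).getD s 0 == 0 then s
        else s ++ "_" ++ PySem.Int.toStr ((d.modify s 0 (· - 1)).getD s 0)])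
      (d.modify s 0 (· - 1))
      (by
        intro t
        rw [PySem.Dict.getD_modify, hv t]
        by_cases ht : t = s
        · subst ht; rw [if_pos rfl, hv t]
          simp only [List.count_cons, beq_self_eq_true, if_true]
          push_cast; ring
        · rw [if_neg ht]
          simp only [List.count_cons]
          rw [if_neg (fun h => ht (eq_of_beq h).symm)]
          push_cast; ring)
    simp only at hstep
    rw [hstep, hemit]
    have : (s :: rest).reverse = rest.reverse ++ [s] := by simp
    rw [this, bLoop_append pre rest.reverse s]
    simp

lemma loopA_eq_bLoop (rest : List String) :
    ∀ (seen acc : List String) (d : PySem.Dict String Int),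
    (∀ x, d.contains x = decide (x ∈ seen)) →
    (∀ x, x ∈ seen → d.getD x 0 = (seen.count x : Int) - 1) →
    (rest.foldl
      (fun (st : List String × PySem.Dict String Int) s =>
        let d :=
          if st.2.contains s then st.2.modify s 0 (· + 1)
          else st.2.insert s 0
        if d.getD s 0 > 0 then
          (st.1 ++ [s ++ "_" ++ PySem.Int.toStr (d.getD s 0)], d)
        else
          (st.1 ++ [s], d))
      (acc, d)).1 = acc ++ bLoop seen rest := by
  induction rest with
  | nil => intro seen acc d _ _; simp [bLoop]
  | cons s t ih =>
    intro seen acc d hc hv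
    rw [List.foldl_cons]
    by_cases hmem : s ∈ seen
    · have hcnt : 0 < seen.count s := List.count_pos_iff.mpr hmem
      have hgd : d.getD s 0 = (seen.count s : Int) - 1 := hv s hmem
      have hcs : d.contains s = true := by rw [hc]; simpa using hmem
      simp only [hcs, if_true, PySem.Dict.getD_modify_self, hgd]
      have hpos : (seen.count s : Int) - 1 + 1 > 0 := by omega
      simp only [sub_add_cancel] at *
      rw [if_pos (by exact_mod_cast hcnt)]
      have hstep := ih (seen ++ [s])
        (acc ++ [s ++ "_" ++ PySem.Int.toStr (seen.count s : Int)])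
        (d.modify s 0 (· + 1))
        (by
          intro x
          rw [PySem.Dict.contains_modify, hc]
          by_cases hx : x = s <;> simp [hx, hmem])
        (by
          intro x hx
          rw [PySem.Dict.getD_modify]
          by_cases hxs : x = s
          · subst hxs
            rw [if_pos rfl, hgd]
            simp [List.count_append]
          · rw [if_neg hxs]
            have hx' : x ∈ seen := by
              rcases List.mem_append.mp hx with h | h
              · exact h
              · simp at h; exact absurd h hxs
            rw [hv x hx']
            simp only [List.count_append, List.count_singleton]
            rw [if_neg (fun h => hxs (eq_of_beq h).symm)]
            push_cast; ring)
      rw [hstep, bLoop]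
      have : sfx seen s = s ++ "_" ++ PySem.Int.toStr (seen.count s : Int) := by
        unfold sfx
        rw [if_neg]
        simp; omega
      simp [this]
    · have hcs : d.contains s = false := by rw [hc]; simpa using hmem
      simp only [hcs, Bool.false_eq_true, if_false, PySem.Dict.getD_insert_self]
      rw [if_neg (by omega)]
      have hstep := ih (seen ++ [s]) (acc ++ [s]) (d.insert s 0)
        (by
          intro x
          rw [PySem.Dict.contains_insert, hc]
          by_cases hx : x = s <;> simp [hx])
        (by
          intro x hx
          rw [PySem.Dict.getD_insert]
          by_cases hxs : x = s
          · subst hxs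
            rw [if_pos rfl]
            simp [List.count_append, List.count_eq_zero_of_not_mem hmem]
          · rw [if_neg hxs]
            have hx' : x ∈ seen := by
              rcases List.mem_append.mp hx with h | h
              · exact h
              · simp at h; exact absurd h hxs
            rw [hv x hx']
            simp only [List.count_append, List.count_singleton]
            rw [if_neg (fun h => hxs (eq_of_beq h).symm)]
            push_cast; ring)
      rw [hstep, bLoop]
      have : sfx seen s = s := by
        unfold sfx
        rw [if_pos]
        simp [List.count_eq_zero_of_not_mem hmem]
      simp [this]

-- ===== VERDICT (by name: the statement is the Claim_ definition above) =====
theorem suffix_duplicates_spec : Claim_equal_suffix_duplicates := by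
  intro strings _
  unfold Spec_suffix_duplicates suffix_duplicates suffix_duplicates_alt
  have hA := loopA_eq_bLoop strings [] [] PySem.Dict.empty
    (by intro x; simp [PySem.Dict.contains_empty]) (by intro x hx; simp at hx)
  have hB := loopB_eq_bLoop strings.reverse [] []
    (strings.foldl (fun (d : PySem.Dict String Int) s => d.insert s (d.getD s 0 + 1)) PySem.Dict.empty)
    (by
      intro t
      rw [PySem.Dict.getD_foldl_insert_add_one]
      simp [List.count_reverse])
  simp only [List.nil_append] at hA hB
  rw [hA]
  simp only [hB, List.reverse_reverse]
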